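-- pv_equiv track=rewrite | github.com/VictoriaTGu/codepractice | gene_splicing/concat_sequences.py | find_index_of_overlap
-- ===== SOURCE A (Python) =====
-- def find_index_of_overlap(head_seq, tail_seq):
--     """Traverse head_seq and tail_seq backwards to check that they match
--     and return the index of head_seq at which tail_seq starts to match
--     """
--     fst_index = len(head_seq) - 1
--     snd_index = len(tail_seq) - 1
--     if snd_index < 0:
--         return None
--     while snd_index >= 0:
--         if fst_index < 0 or head_seq[fst_index] != tail_seq[snd_index]:
--             return None
--         else:
--             fst_index -= 1
--             snd_index -= 1
--     return fst_index + 1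
-- ===== SOURCE B (Python) =====
-- def find_index_of_overlap(head_seq, tail_seq):
--     """Closed-form: tail_seq must be a non-empty suffix of head_seq."""
--     start = len(head_seq) - len(tail_seq)
--     if not tail_seq or start < 0:
--         return None
--     return start if head_seq[start:] == tail_seq else None
-- ===== Notes on version B (the rewrite author's own statement) =====
-- stated objective: simpler
-- what changed: Replaces the backward element-by-element while loop with a closed-form start index len(head)-len(tail) plus a single slice equality check.
import Mathlib
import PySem

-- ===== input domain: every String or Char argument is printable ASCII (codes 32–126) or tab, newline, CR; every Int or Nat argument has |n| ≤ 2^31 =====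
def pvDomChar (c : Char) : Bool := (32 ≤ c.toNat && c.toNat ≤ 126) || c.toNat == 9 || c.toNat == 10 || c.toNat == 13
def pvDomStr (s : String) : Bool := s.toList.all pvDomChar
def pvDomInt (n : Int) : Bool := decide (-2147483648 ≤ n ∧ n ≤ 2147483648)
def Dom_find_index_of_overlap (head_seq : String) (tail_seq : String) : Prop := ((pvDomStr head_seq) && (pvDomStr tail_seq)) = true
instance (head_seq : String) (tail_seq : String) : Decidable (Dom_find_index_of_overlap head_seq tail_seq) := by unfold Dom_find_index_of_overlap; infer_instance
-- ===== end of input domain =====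

-- B replaces A's backward element-by-element while loop by a closed-form start index and one slice comparison (objective: simpler).


-- ===== PORT A =====
-- A's while loop; `fuel` bounds the iteration count (it is snd_index + 1 at entry, so fuel
-- running out coincides exactly with the loop condition snd_index >= 0 turning false)
def pvALoop (h t : List Char) : Nat → Int → Int → Option Int
  | 0, fst_index, _ => some (fst_index + 1)
  | fuel + 1, fst_index, snd_index =>
      if snd_index ≥ 0 then
        if fst_index < 0 ∨ PySem.List.pyGet? h fst_index ≠ PySem.List.pyGet? t snd_index then
          none
        else
          pvALoop h t fuel (fst_index - 1) (snd_index - 1)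
      else some (fst_index + 1)

def find_index_of_overlap (head_seq : String) (tail_seq : String) : Option Int :=
  let h := head_seq.toList
  let t := tail_seq.toList
  let fst_index : Int := (h.length : Int) - 1
  let snd_index : Int := (t.length : Int) - 1
  if snd_index < 0 then none
  else pvALoop h t t.length fst_index snd_index

-- ===== PORT B =====
def find_index_of_overlap_alt (head_seq : String) (tail_seq : String) : Option Int :=
  let h := head_seq.toList
  let t := tail_seq.toList
  let start : Int := (h.length : Int) - (t.length : Int)
  if t = [] ∨ start < 0 then none
  else if PySem.List.slice h (some start) none = t then some start else none

-- ===== PRECONDITION & SPEC =====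
def Spec_find_index_of_overlap (head_seq : String) (tail_seq : String) (out : Option Int) : Prop := out = find_index_of_overlap_alt head_seq tail_seq
instance (head_seq : String) (tail_seq : String) (out : Option Int) : Decidable (Spec_find_index_of_overlap head_seq tail_seq out) := by unfold Spec_find_index_of_overlap; infer_instance

-- ===== CLAIM (what is proved, stated in full; the proofs are below) =====
def Claim_equal_find_index_of_overlap : Prop := ∀ (head_seq : String) (tail_seq : String), Dom_find_index_of_overlap head_seq tail_seq → Spec_find_index_of_overlap head_seq tail_seq (find_index_of_overlap head_seq tail_seq)

-- ===== LEMMAS AND PROOFS =====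

-- Invariant of A's loop: with i elements of h and j elements of t still to compare (from the
-- back), the loop succeeds iff the last j elements of h.take i equal t.take j.
lemma pvALoop_eq (h t : List Char) :
    ∀ (j i : Nat), i ≤ h.length → j ≤ t.length →
    pvALoop h t j ((i : Int) - 1) ((j : Int) - 1) =
      if j ≤ i ∧ (h.take i).drop (i - j) = t.take j then some ((i : Int) - (j : Int)) else none := by
  intro j
  induction j with
  | zero =>
      intro i hi _
      simp [pvALoop]
  | succ j ih =>
      intro i hi hj
      cases i with
      | zero => simp [pvALoop]
      | succ i' =>
          have hi' : i' < h.length := by omega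
          have hj' : j < t.length := by omega
          have hc1 : ((j + 1 : Nat) : Int) = (j : Int) + 1 := by push_cast; ring
          have hc2 : ((i' + 1 : Nat) : Int) = (i' : Int) + 1 := by push_cast; ring
          rw [hc1, hc2, show ((i' : Int) + 1 - 1) = (i' : Int) from by ring,
              show ((j : Int) + 1 - 1) = (j : Int) from by ring]
          have hgh : PySem.List.pyGet? h (i' : Int) = some h[i'] := by
            rw [PySem.List.pyGet?_natCast, List.getElem?_eq_getElem hi']
          have hgt : PySem.List.pyGet? t (j : Int) = some t[j] := by
            rw [PySem.List.pyGet?_natCast, List.getElem?_eq_getElem hj']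
          have hstep : pvALoop h t (j + 1) (i' : Int) (j : Int) =
              if (j : Int) ≥ 0 then
                if (i' : Int) < 0 ∨ PySem.List.pyGet? h (i' : Int) ≠ PySem.List.pyGet? t (j : Int) then
                  none
                else pvALoop h t j ((i' : Int) - 1) ((j : Int) - 1)
              else some ((i' : Int) + 1) := rfl
          rw [hstep, if_pos (by omega)]
          have htakeh : h.take (i' + 1) = h.take i' ++ [h[i']] := by
            rw [List.take_add_one, List.getElem?_eq_getElem hi']; rfl
          have htaket : t.take (j + 1) = t.take j ++ [t[j]] := by
            rw [List.take_add_one, List.getElem?_eq_getElem hj']; rfl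
          have hlen : (h.take i').length = i' := by rw [List.length_take]; omega
          have hidx : i' + 1 - (j + 1) = i' - j := by omega
          have hdrap : List.drop (i' - j) (List.take i' h ++ [h[i']]) =
              List.drop (i' - j) (List.take i' h) ++ [h[i']] :=
            List.drop_append_of_le_length (by rw [hlen]; omega)
          have hcond : ((h.take (i' + 1)).drop (i' + 1 - (j + 1)) = t.take (j + 1)) ↔
              ((h.take i').drop (i' - j) = t.take j ∧ h[i'] = t[j]) := by
            rw [htakeh, htaket, hidx, hdrap]
            constructor
            · intro hEq
              have := List.append_inj' hEq (by simp)
              exact ⟨this.1, by simpa using this.2⟩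
            · rintro ⟨h1, h2⟩; rw [h1, h2]
          by_cases hc : h[i'] = t[j]
          · rw [if_neg (by
                  rintro (hlt | hne)
                  · omega
                  · exact hne (by rw [hgh, hgt, hc])),
                ih i' (by omega) (by omega)]
            by_cases hdr : (h.take i').drop (i' - j) = t.take j
            · have hji' : j ≤ i' := by
                have hL := congrArg List.length hdr
                simp [List.length_take, List.length_drop] at hL
                omega
              rw [if_pos (show j ≤ i' ∧ (h.take i').drop (i' - j) = t.take j from
                    ⟨hji', hdr⟩),
                  if_pos (show j + 1 ≤ i' + 1 ∧
                      (h.take (i' + 1)).drop (i' + 1 - (j + 1)) = t.take (j + 1) from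
                    ⟨by omega, hcond.mpr ⟨hdr, hc⟩⟩)]
              congr 1
              ring
            · rw [if_neg (fun hcc => hdr hcc.2), if_neg (fun hcc => hdr (hcond.mp hcc.2).1)]
          · rw [if_pos (Or.inr (by rw [hgh, hgt]; exact fun He => hc (Option.some.inj He))),
                if_neg (fun hcc => hc (hcond.mp hcc.2).2)]

-- ===== VERDICT (by name: the statement is the Claim_ definition above) =====
theorem find_index_of_overlap_spec : Claim_equal_find_index_of_overlap := by
  intro head_seq tail_seq _
  unfold Spec_find_index_of_overlap
  simp only [find_index_of_overlap, find_index_of_overlap_alt]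
  generalize head_seq.toList = h
  generalize tail_seq.toList = t
  by_cases hte : t = []
  · subst hte; simp
  · have htpos : 0 < t.length := List.length_pos_of_ne_nil hte
    rw [if_neg (by omega : ¬ ((t.length : Int) - 1 < 0)),
        pvALoop_eq h t t.length h.length le_rfl le_rfl, List.take_length, List.take_length]
    by_cases hle : t.length ≤ h.length
    · rw [if_neg (show ¬ (t = [] ∨ (h.length : Int) - (t.length : Int) < 0) by
            rintro (h1 | h2)
            · exact hte h1
            · omega)]
      rw [show (h.length : Int) - (t.length : Int) = ((h.length - t.length : Nat) : Int) from by
            omega,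
          PySem.List.slice_from_natCast]
      by_cases hdr : h.drop (h.length - t.length) = t
      · rw [if_pos (show t.length ≤ h.length ∧ h.drop (h.length - t.length) = t from
              ⟨hle, hdr⟩),
            if_pos hdr]
      · rw [if_neg (fun hcc => hdr hcc.2), if_neg hdr]
    · rw [if_neg (fun hcc => hle hcc.1), if_pos (Or.inr (by omega))]
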